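-- pv_equiv track=rewrite | github.com/pydanny/pydanny.github.com | posts2015/pytester.py | sort_code_blocks
-- ===== SOURCE A (Python) =====
-- def sort_code_blocks(code_blocks):
--     working_blocks = []
--     testing_blocks = []
--     for block in code_blocks:
--         if "(unittest.TestCase)" in block or "def test_" in block:
--             testing_blocks.append(block)
--             continue
--         working_blocks.append(block)
--
--     return working_blocks + testing_blocks
-- ===== SOURCE B (Python) =====
-- def sort_code_blocks(code_blocks):
--     # decorate-sort-undecorate: stable sort on the precomputed bool key
--     # (False = working block, True = testing block)
--     decorated = [
--         ("(unittest.TestCase)" in block or "def test_" in block, block)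
--         for block in code_blocks
--     ]
--     return [block for _, block in sorted(decorated, key=lambda pair: pair[0])]
-- ===== Notes on version B (the rewrite author's own statement) =====
-- stated objective: idiomatic
-- what changed: Replaced the two-accumulator partition-and-concatenate loop with a single stable sort keyed on the bool predicate (False=working, True=testing); stability preserves the original order within each group.
import Mathlib
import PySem

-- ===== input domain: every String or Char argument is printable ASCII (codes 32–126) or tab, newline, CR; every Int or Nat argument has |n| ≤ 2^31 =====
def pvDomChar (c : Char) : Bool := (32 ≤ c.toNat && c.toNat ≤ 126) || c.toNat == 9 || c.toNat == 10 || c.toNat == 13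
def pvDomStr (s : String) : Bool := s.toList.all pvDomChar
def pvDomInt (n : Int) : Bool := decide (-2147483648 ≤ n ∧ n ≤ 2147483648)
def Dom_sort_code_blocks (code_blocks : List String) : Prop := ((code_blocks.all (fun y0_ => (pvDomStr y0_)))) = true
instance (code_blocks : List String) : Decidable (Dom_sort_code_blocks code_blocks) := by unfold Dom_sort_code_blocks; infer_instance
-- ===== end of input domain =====

-- B replaces A's two-accumulator partition loop by a decorate-sort-undecorate stable sort
-- on the precomputed testing-block bool key (idiomatic; same return value, not claimed faster).

-- ===== PORT A =====
-- the predicate: "(unittest.TestCase)" in block or "def test_" in block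
def pvIsTest (block : String) : Bool :=
  PySem.Str.isIn "(unittest.TestCase)" block || PySem.Str.isIn "def test_" block

def sort_code_blocks (code_blocks : List String) : List String :=
  let acc := code_blocks.foldl
    (fun (acc : List String × List String) block =>
      if pvIsTest block then (acc.1, acc.2 ++ [block]) else (acc.1 ++ [block], acc.2))
    ([], [])
  acc.1 ++ acc.2

-- ===== PORT B =====
def sort_code_blocks_alt (code_blocks : List String) : List String :=
  let decorated := code_blocks.map (fun block => (pvIsTest block, block))
  (PySem.List.sorted decorated (fun pair => pair.1) false).map (fun pair => pair.2)

-- ===== PRECONDITION & SPEC =====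
def Spec_sort_code_blocks (code_blocks : List String) (out : List String) : Prop := out = sort_code_blocks_alt code_blocks
instance (code_blocks : List String) (out : List String) : Decidable (Spec_sort_code_blocks code_blocks out) := by unfold Spec_sort_code_blocks; infer_instance

-- ===== CLAIM (what is proved, stated in full; the proofs are below) =====
def Claim_equal_sort_code_blocks : Prop := ∀ (code_blocks : List String), Dom_sort_code_blocks code_blocks → Spec_sort_code_blocks code_blocks (sort_code_blocks code_blocks)

-- ===== LEMMAS AND PROOFS =====

-- A's loop with both accumulators generalised: it appends the non-test blocks to the
-- first accumulator and the test blocks to the second, preserving order.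
theorem pvA_fold (xs : List String) : ∀ (w t : List String),
    xs.foldl
      (fun (acc : List String × List String) block =>
        if pvIsTest block then (acc.1, acc.2 ++ [block]) else (acc.1 ++ [block], acc.2))
      (w, t)
    = (w ++ xs.filter (fun b => !pvIsTest b), t ++ xs.filter pvIsTest) := by
  induction xs with
  | nil => intro w t; simp
  | cons x xs ih =>
    intro w t
    by_cases h : pvIsTest x = true
    · simp [List.foldl_cons, h, ih]
    · simp only [Bool.not_eq_true] at h
      simp [List.foldl_cons, h, ih]

-- inserting behind a prefix none of whose elements come after x
theorem pvInsertBy_append {α : Type} (before : α → α → Bool) (x : α) :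
    ∀ (F T : List α), (∀ y ∈ F, before x y = false) →
    PySem.List.insertBy before x (F ++ T) = F ++ PySem.List.insertBy before x T := by
  intro F
  induction F with
  | nil => intro T _; simp
  | cons f fs ih =>
    intro T h
    have hf : before x f = false := h f (by simp)
    simp only [List.cons_append, PySem.List.insertBy, hf]
    simp [ih T (fun y hy => h y (by simp [hy]))]

-- stable insertion sort by a Bool key partitions: false-keyed elements first.
theorem pvSort_fold {α : Type} (key : α → Bool) (xs : List α) : ∀ (F T : List α),
    (∀ y ∈ F, key y = false) → (∀ y ∈ T, key y = true) →
    xs.foldl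
      (fun acc x => PySem.List.insertBy (fun a b => decide (key a < key b)) x acc)
      (F ++ T)
    = (F ++ xs.filter (fun b => !key b)) ++ (T ++ xs.filter key) := by
  induction xs with
  | nil => intro F T _ _; simp
  | cons x xs ih =>
    intro F T hF hT
    by_cases h : key x = true
    · -- x's key is true: no element's key exceeds true, so x is appended at the end
      have hstep : PySem.List.insertBy (fun a b => decide (key a < key b)) x (F ++ T)
          = (F ++ T) ++ [x] := by
        apply PySem.List.insertBy_of_forall_not_before
        intro y _
        simp [h]
      have := ih F (T ++ [x]) hF (by intro y hy; rcases List.mem_append.mp hy with hy | hy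
                                     · exact hT y hy
                                     · simp at hy; simpa [hy])
      simpa [List.foldl_cons, hstep, List.append_assoc, h] using this
    · -- x's key is false: it is inserted right after F (before the first true-keyed element)
      simp only [Bool.not_eq_true] at h
      have hstep : PySem.List.insertBy (fun a b => decide (key a < key b)) x (F ++ T)
          = (F ++ [x]) ++ T := by
        rw [pvInsertBy_append _ _ F T (by intro y hy; simp [h, hF y hy])]
        cases T with
        | nil => simp [PySem.List.insertBy]
        | cons t ts =>
          have ht : key t = true := hT t (by simp)
          simp [PySem.List.insertBy, h, ht]
      have := ih (F ++ [x]) T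
        (by intro y hy; rcases List.mem_append.mp hy with hy | hy
            · exact hF y hy
            · simp at hy; simpa [hy])
        hT
      simpa [List.foldl_cons, hstep, List.append_assoc, h] using this

-- ===== VERDICT (by name: the statement is the Claim_ definition above) =====
theorem sort_code_blocks_spec : Claim_equal_sort_code_blocks := by
  intro code_blocks _
  unfold Spec_sort_code_blocks sort_code_blocks sort_code_blocks_alt
  simp only [PySem.List.sorted_eq_foldl_insertBy]
  have hA := pvA_fold code_blocks [] []
  have hB := pvSort_fold (fun p : Bool × String => p.1)
    (code_blocks.map (fun block => (pvIsTest block, block))) [] [] (by simp) (by simp)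
  simp only [List.nil_append, List.append_nil] at hA hB
  rw [hA, hB]
  simp [List.filter_map, List.map_map, Function.comp_def]
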